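-- pv_equiv track=rewrite | github.com/Mathias-a/NmFrameMog | apps/astar-island/src/astar_island/api.py | plan_viewports
-- ===== SOURCE A (Python) =====
-- VP_SIZE = 15
--
-- def plan_viewports(
--     grid_h: int = 40,
--     grid_w: int = 40,
--     vp_size: int = VP_SIZE,
-- ) -> list[tuple[int, int]]:
--     """Generate 3x3 tiling positions covering the dynamic interior.
--
--     Starts at (1,1) to skip ocean border. Tiles without gaps, allowing
--     overlap at edges to ensure full coverage.
--     """
--     positions: list[tuple[int, int]] = []
--     y = 1
--     while y + vp_size <= grid_h:
--         x = 1
--         while x + vp_size <= grid_w: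
--             positions.append((x, y))
--             x += vp_size
--         if x < grid_w - 1:
--             positions.append((grid_w - vp_size, y))
--         y += vp_size
--     if y < grid_h - 1:
--         x = 1
--         while x + vp_size <= grid_w:
--             positions.append((x, grid_h - vp_size))
--             x += vp_size
--         if x < grid_w - 1:
--             positions.append((grid_w - vp_size, grid_h - vp_size))
--     seen: set[tuple[int, int]] = set()
--     deduped: list[tuple[int, int]] = []
--     for pos in positions:
--         if pos not in seen:
--             seen.add(pos)
--             deduped.append(pos)
--     return deduped
-- ===== SOURCE B (Python) =====
-- VP_SIZE = 15
--
-- def plan_viewports(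
--     grid_h: int = 40,
--     grid_w: int = 40,
--     vp_size: int = VP_SIZE,
-- ) -> list[tuple[int, int]]:
--     """Factored tiling: compute each axis's positions once, then take the product.
--
--     The stepped positions plus the single snapped edge position are always
--     distinct, so no dedup pass is needed.
--     """
--     def axis(limit: int) -> list[int]:
--         vals = list(range(1, limit - vp_size + 1, vp_size))
--         if 1 + vp_size * len(vals) < limit - 1:
--             vals.append(limit - vp_size)
--         return vals
--
--     ys = axis(grid_h)
--     if not ys:
--         return []
--     xs = axis(grid_w)
--     return [(x, y) for y in ys for x in xs]
-- ===== Notes on version B (the rewrite author's own statement) =====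
-- stated objective: simpler
-- what changed: B factors the tiling into two independent 1D axis computations (a range plus one snapped edge position) and returns their Cartesian product, dropping A's per-row re-walk of x and the whole dedup pass (the positions are provably always distinct).
-- outside the precondition, e.g. on plan_viewports(-5, 5, -2): A returns [], B returns [(7, 1), (7, -1)]
import Mathlib
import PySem

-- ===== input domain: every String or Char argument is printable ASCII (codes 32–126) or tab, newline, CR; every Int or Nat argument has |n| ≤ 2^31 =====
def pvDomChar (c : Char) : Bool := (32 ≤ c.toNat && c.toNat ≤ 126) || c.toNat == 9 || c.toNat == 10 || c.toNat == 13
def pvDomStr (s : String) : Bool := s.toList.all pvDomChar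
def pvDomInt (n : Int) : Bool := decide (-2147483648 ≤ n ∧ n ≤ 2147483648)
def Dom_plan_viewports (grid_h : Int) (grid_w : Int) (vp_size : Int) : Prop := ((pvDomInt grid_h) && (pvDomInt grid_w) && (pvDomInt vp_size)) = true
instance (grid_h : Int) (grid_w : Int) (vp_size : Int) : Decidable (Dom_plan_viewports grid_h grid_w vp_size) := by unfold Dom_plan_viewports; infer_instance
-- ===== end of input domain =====

-- B factors the tiling into two 1D axis passes (range + one snapped edge value) and returns
-- their Cartesian product, dropping A's per-row x re-walk and the dedup pass (objective: simpler).


-- ===== PORT A =====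
-- inner 'while x + vp_size <= grid_w' loop; fuel is only a totality guard (enough under Pre_);
-- returns (positions, final x)
def pvInnerA (fuel : Nat) (x y grid_w vp_size : Int) (acc : List (Int × Int)) :
    List (Int × Int) × Int :=
  match fuel with
  | 0 => (acc, x)
  | fuel + 1 =>
    if x + vp_size ≤ grid_w then
      pvInnerA fuel (x + vp_size) y grid_w vp_size (acc ++ [(x, y)])
    else (acc, x)

-- one row body: the inner while loop from x = 1, then the edge-snap append
def pvRowA (y grid_w vp_size : Int) (acc : List (Int × Int)) : List (Int × Int) :=
  let r := pvInnerA (grid_w.toNat + 1) 1 y grid_w vp_size acc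
  if r.2 < grid_w - 1 then r.1 ++ [(grid_w - vp_size, y)] else r.1

-- outer 'while y + vp_size <= grid_h' loop; returns (positions, final y)
def pvOuterA (fuel : Nat) (y grid_h grid_w vp_size : Int) (acc : List (Int × Int)) :
    List (Int × Int) × Int :=
  match fuel with
  | 0 => (acc, y)
  | fuel + 1 =>
    if y + vp_size ≤ grid_h then
      pvOuterA fuel (y + vp_size) grid_h grid_w vp_size (pvRowA y grid_w vp_size acc)
    else (acc, y)

-- the final dedup loop over positions, with its 'seen' set
def pvDedupA (positions : List (Int × Int)) : List (Int × Int) :=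
  (positions.foldl
    (fun (st : PySem.Set (Int × Int) × List (Int × Int)) pos =>
      if st.1.contains pos then st else (st.1.add pos, st.2 ++ [pos]))
    (PySem.Set.empty, [])).2

def plan_viewports (grid_h : Int) (grid_w : Int) (vp_size : Int) : List (Int × Int) :=
  let r := pvOuterA (grid_h.toNat + 1) 1 grid_h grid_w vp_size []
  let positions := if r.2 < grid_h - 1 then pvRowA (grid_h - vp_size) grid_w vp_size r.1 else r.1
  pvDedupA positions

-- ===== PORT B =====
-- B's axis helper: range(1, limit - vp_size + 1, vp_size) plus the snapped edge position
def pvAxisB (limit vp_size : Int) : List Int :=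
  if 1 + vp_size * ((PySem.List.pyRange 1 (limit - vp_size + 1) vp_size).length : Int) < limit - 1
  then PySem.List.pyRange 1 (limit - vp_size + 1) vp_size ++ [limit - vp_size]
  else PySem.List.pyRange 1 (limit - vp_size + 1) vp_size

def plan_viewports_alt (grid_h : Int) (grid_w : Int) (vp_size : Int) : List (Int × Int) :=
  let ys := pvAxisB grid_h vp_size
  if ys = [] then []
  else
    let xs := pvAxisB grid_w vp_size
    ys.flatMap (fun y => xs.map (fun x => (x, y)))

-- ===== PRECONDITION & SPEC =====
-- Pre_ excludes vp_size ≤ 0, outside the function's natural domain: there A's while loops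
-- diverge on almost all grids (and return [] only on grids smaller than the negative step),
-- while B's range with a non-positive step raises or yields different junk.
def Pre_plan_viewports (grid_h : Int) (grid_w : Int) (vp_size : Int) : Prop := 1 ≤ vp_size
instance (grid_h : Int) (grid_w : Int) (vp_size : Int) : Decidable (Pre_plan_viewports grid_h grid_w vp_size) := by unfold Pre_plan_viewports; infer_instance

def pvWitness_plan_viewports : Int × Int × Int := (40, 40, 15)

def Spec_plan_viewports (grid_h : Int) (grid_w : Int) (vp_size : Int) (out : List (Int × Int)) : Prop := out = plan_viewports_alt grid_h grid_w vp_size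
instance (grid_h : Int) (grid_w : Int) (vp_size : Int) (out : List (Int × Int)) : Decidable (Spec_plan_viewports grid_h grid_w vp_size out) := by unfold Spec_plan_viewports; infer_instance

-- ===== CLAIM (what is proved, stated in full; the proofs are below) =====
def Claim_equal_plan_viewports : Prop := ∀ (grid_h : Int) (grid_w : Int) (vp_size : Int), Dom_plan_viewports grid_h grid_w vp_size → Pre_plan_viewports grid_h grid_w vp_size → Spec_plan_viewports grid_h grid_w vp_size (plan_viewports grid_h grid_w vp_size)

-- ===== LEMMAS AND PROOFS =====

-- pyRange unfolding lemmas for a positive step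
theorem pyRange_nil_of_pos {a b s : Int} (hs : 0 < s) (h : b ≤ a) :
    PySem.List.pyRange a b s = [] := by
  rw [PySem.List.pyRange_of_pos a b hs]
  simp [if_neg (by omega : ¬ a < b)]

theorem pyRange_cons_of_pos {a b s : Int} (hs : 0 < s) (h : a < b) :
    PySem.List.pyRange a b s = a :: PySem.List.pyRange (a + s) b s := by
  rw [PySem.List.pyRange_of_pos a b hs, PySem.List.pyRange_of_pos (a + s) b hs]
  have hcount : ((b - a + s - 1) / s).toNat =
      (if a + s < b then ((b - (a + s) + s - 1) / s).toNat else 0) + 1 := by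
    by_cases hb : a + s < b
    · rw [if_pos hb]
      have heq : b - a + s - 1 = (b - (a + s) + s - 1) + 1 * s := by ring
      rw [heq, Int.add_mul_ediv_right _ _ (by omega : s ≠ 0)]
      have h0 : 0 ≤ (b - (a + s) + s - 1) / s :=
        Int.ediv_nonneg (by omega) (by omega)
      omega
    · rw [if_neg hb]
      have h4 : 1 ≤ (b - a + s - 1) / s :=
        (Int.le_ediv_iff_mul_le hs).mpr (by omega)
      have h5 : (b - a + s - 1) / s < 2 :=
        (Int.ediv_lt_iff_lt_mul hs).mpr (by omega)
      omega
  rw [if_pos h, hcount, List.range_succ_eq_map, List.map_cons, List.map_map]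
  refine congrArg₂ List.cons (by simp) (List.map_congr_left fun k _ => ?_)
  simp only [Function.comp_apply, Nat.succ_eq_add_one]
  push_cast
  ring

-- every element of a positive-step range is start + step * k with k below the length
theorem mem_pyRange_pos_exists {a b s x : Int} (hs : 0 < s)
    (hx : x ∈ PySem.List.pyRange a b s) :
    ∃ k : Nat, k < (PySem.List.pyRange a b s).length ∧ x = a + s * k := by
  rw [PySem.List.pyRange_of_pos a b hs] at hx ⊢
  rw [List.mem_map] at hx
  obtain ⟨k, hk, hkx⟩ := hx
  exact ⟨k, by simpa using List.mem_range.mp hk, hkx.symm⟩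

-- a positive-step range has no duplicates
theorem nodup_pyRange_pos {a b s : Int} (hs : 0 < s) :
    (PySem.List.pyRange a b s).Nodup := by
  rw [PySem.List.pyRange_of_pos a b hs]
  refine List.Nodup.map ?_ (List.nodup_range)
  intro i j hij
  have h1 : s * (i : Int) = s * (j : Int) := by
    have := add_left_cancel hij
    exact this
  have := mul_left_cancel₀ (by omega : s ≠ 0) h1
  exact_mod_cast this

-- B's axis list has no duplicates
theorem nodup_pvAxisB {limit vp : Int} (hvp : 1 ≤ vp) : (pvAxisB limit vp).Nodup := by
  unfold pvAxisB
  split_ifs with hcond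
  · refine List.Nodup.append (nodup_pyRange_pos (by omega)) (List.nodup_singleton _) ?_
    intro x hx hx'
    rw [List.mem_singleton] at hx'
    subst hx'
    obtain ⟨k, hk, hkx⟩ := mem_pyRange_pos_exists (by omega : (0:Int) < vp) hx
    have hkk : (k : Int) + 1 ≤ ((PySem.List.pyRange 1 (limit - vp + 1) vp).length : Int) := by
      exact_mod_cast hk
    have hmul : vp * ((k : Int) + 1) ≤
        vp * ((PySem.List.pyRange 1 (limit - vp + 1) vp).length : Int) :=
      mul_le_mul_of_nonneg_left hkk (by omega)
    nlinarith [hcond, hkx]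
  · exact nodup_pyRange_pos (by omega)

-- the product of two nodup axis lists is nodup
theorem nodup_product {xs ys : List Int} (hxs : xs.Nodup) (hys : ys.Nodup) :
    (ys.flatMap (fun y => xs.map (fun x => (x, y)))).Nodup := by
  induction ys with
  | nil => simp
  | cons y ys ih =>
    rw [List.nodup_cons] at hys
    rw [List.flatMap_cons, List.nodup_append]
    refine ⟨List.Nodup.map ?_ hxs, ih hys.2, ?_⟩
    · intro a b hab
      exact (Prod.mk.injEq _ _ _ _ ▸ hab).1
    · intro p hp q hq
      rw [List.mem_map] at hp
      obtain ⟨x, -, hx⟩ := hp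
      rw [List.mem_flatMap] at hq
      obtain ⟨y', hy', hq'⟩ := hq
      rw [List.mem_map] at hq'
      obtain ⟨x', -, hx'⟩ := hq'
      intro hpq
      apply hys.1
      have h2 : (x, y) = (x', y') := hx.trans (hpq.trans hx'.symm)
      have h3 : y = y' := (Prod.mk.injEq _ _ _ _ ▸ h2).2
      rw [h3]
      exact hy'

-- A's dedup loop is the identity on nodup input
theorem pvDedupA_aux (l : List (Int × Int)) (seen : PySem.Set (Int × Int))
    (acc : List (Int × Int)) (hnd : l.Nodup) (hdisj : ∀ p ∈ l, p ∉ seen) :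
    (l.foldl
      (fun (st : PySem.Set (Int × Int) × List (Int × Int)) pos =>
        if st.1.contains pos then st else (st.1.add pos, st.2 ++ [pos]))
      (seen, acc)).2 = acc ++ l := by
  induction l generalizing seen acc with
  | nil => simp
  | cons p l ih =>
    rw [List.nodup_cons] at hnd
    rw [List.foldl_cons]
    have hnp : ¬ (seen.contains p = true) := by
      rw [PySem.Set.contains_iff]
      exact hdisj p List.mem_cons_self
    rw [if_neg hnp]
    rw [ih (seen.add p) (acc ++ [p]) hnd.2 ?_]
    · simp
    · intro q hq
      rw [PySem.Set.mem_add]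
      push_neg
      exact ⟨hdisj q (List.mem_cons_of_mem _ hq), fun h => hnd.1 (h ▸ hq)⟩

theorem pvDedupA_of_nodup {l : List (Int × Int)} (h : l.Nodup) : pvDedupA l = l := by
  unfold pvDedupA
  rw [pvDedupA_aux l PySem.Set.empty [] h (by intro p _; simp [PySem.Set.empty])]
  simp

-- A's inner loop computes the x-range and ends at 1 + vp * length
theorem pvInnerA_eq {grid_w vp : Int} (hvp : 1 ≤ vp) :
    ∀ (fuel : Nat) (x y : Int) (acc : List (Int × Int)), (grid_w + 1 - x).toNat ≤ fuel →
    pvInnerA fuel x y grid_w vp acc =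
      (acc ++ (PySem.List.pyRange x (grid_w - vp + 1) vp).map (fun t => (t, y)),
       x + vp * ((PySem.List.pyRange x (grid_w - vp + 1) vp).length : Int)) := by
  intro fuel
  induction fuel with
  | zero =>
    intro x y acc hf
    rw [pyRange_nil_of_pos (by omega) (by omega)]
    simp [pvInnerA]
  | succ fuel ih =>
    intro x y acc hf
    unfold pvInnerA
    by_cases hc : x + vp ≤ grid_w
    · rw [if_pos hc]
      rw [ih (x + vp) y (acc ++ [(x, y)]) (by omega)]
      rw [pyRange_cons_of_pos (by omega : (0:Int) < vp) (by omega : x < grid_w - vp + 1)]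
      simp only [List.map_cons, List.length_cons, List.append_assoc, List.singleton_append]
      rw [Prod.mk.injEq]
      refine ⟨rfl, ?_⟩
      push_cast
      ring
    · rw [if_neg hc]
      rw [pyRange_nil_of_pos (by omega) (by omega)]
      simp

-- one row of A equals B's x-axis tagged with y
theorem pvRowA_eq {grid_w vp : Int} (hvp : 1 ≤ vp) (y : Int) (acc : List (Int × Int)) :
    pvRowA y grid_w vp acc = acc ++ (pvAxisB grid_w vp).map (fun x => (x, y)) := by
  unfold pvRowA pvAxisB
  rw [pvInnerA_eq hvp (grid_w.toNat + 1) 1 y acc (by omega)]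
  by_cases hc : 1 + vp * ((PySem.List.pyRange 1 (grid_w - vp + 1) vp).length : Int) < grid_w - 1
  · rw [if_pos hc, if_pos hc]
    simp
  · rw [if_neg hc, if_neg hc]

-- A's outer loop computes the rows of the y-range and ends at 1 + vp * length
theorem pvOuterA_eq {grid_h grid_w vp : Int} (hvp : 1 ≤ vp) :
    ∀ (fuel : Nat) (y : Int) (acc : List (Int × Int)), (grid_h + 1 - y).toNat ≤ fuel →
    pvOuterA fuel y grid_h grid_w vp acc =
      (acc ++ (PySem.List.pyRange y (grid_h - vp + 1) vp).flatMap
          (fun yy => (pvAxisB grid_w vp).map (fun x => (x, yy))),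
       y + vp * ((PySem.List.pyRange y (grid_h - vp + 1) vp).length : Int)) := by
  intro fuel
  induction fuel with
  | zero =>
    intro y acc hf
    rw [pyRange_nil_of_pos (by omega) (by omega)]
    simp [pvOuterA]
  | succ fuel ih =>
    intro y acc hf
    unfold pvOuterA
    by_cases hc : y + vp ≤ grid_h
    · rw [if_pos hc]
      rw [pvRowA_eq hvp y acc]
      rw [ih (y + vp) _ (by omega)]
      rw [pyRange_cons_of_pos (by omega : (0:Int) < vp) (by omega : y < grid_h - vp + 1)]
      simp only [List.flatMap_cons, List.length_cons, List.append_assoc]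
      rw [Prod.mk.injEq]
      refine ⟨rfl, ?_⟩
      push_cast
      ring
    · rw [if_neg hc]
      rw [pyRange_nil_of_pos (by omega) (by omega)]
      simp

-- B's early [] return is just the empty product
theorem plan_viewports_alt_eq (grid_h grid_w vp : Int) :
    plan_viewports_alt grid_h grid_w vp =
      (pvAxisB grid_h vp).flatMap (fun y => (pvAxisB grid_w vp).map (fun x => (x, y))) := by
  unfold plan_viewports_alt
  by_cases h : pvAxisB grid_h vp = []
  · rw [if_pos h, h]
    simp
  · rw [if_neg h]

-- before dedup, A's position list is exactly B's product
theorem positions_eq {grid_h grid_w vp : Int} (hvp : 1 ≤ vp) :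
    (let r := pvOuterA (grid_h.toNat + 1) 1 grid_h grid_w vp []
     if r.2 < grid_h - 1 then pvRowA (grid_h - vp) grid_w vp r.1 else r.1) =
      plan_viewports_alt grid_h grid_w vp := by
  rw [pvOuterA_eq hvp (grid_h.toNat + 1) 1 [] (by omega)]
  rw [plan_viewports_alt_eq]
  simp only [List.nil_append]
  by_cases hc : 1 + vp * ((PySem.List.pyRange 1 (grid_h - vp + 1) vp).length : Int) < grid_h - 1
  · rw [if_pos hc, pvRowA_eq hvp]
    conv_rhs => rw [show pvAxisB grid_h vp =
      PySem.List.pyRange 1 (grid_h - vp + 1) vp ++ [grid_h - vp] by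
        unfold pvAxisB; rw [if_pos hc]]
    rw [List.flatMap_append]
    simp
  · rw [if_neg hc]
    conv_rhs => rw [show pvAxisB grid_h vp = PySem.List.pyRange 1 (grid_h - vp + 1) vp by
      unfold pvAxisB; rw [if_neg hc]]

-- ===== VERDICT (by name: the statement is the Claim_ definition above) =====
theorem plan_viewports_spec : Claim_equal_plan_viewports := by
  intro grid_h grid_w vp _ hpre
  unfold Spec_plan_viewports plan_viewports
  have hpos := positions_eq (grid_h := grid_h) (grid_w := grid_w) (vp := vp) hpre
  simp only at hpos ⊢
  rw [hpos]
  rw [plan_viewports_alt_eq]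
  exact pvDedupA_of_nodup (nodup_product (nodup_pvAxisB hpre) (nodup_pvAxisB hpre))
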